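-- pv_equiv track=rewrite | github.com/kirilenkobm/random_bio_tools | split_CESAR_output.py | get_starts_ends
-- ===== SOURCE A (Python) =====
-- def get_starts_ends(r_seq):
--     """Return start and end indexes."""
--     r_len = len(r_seq)
--     start_end = []
--     for i in range(1, r_len):
--         prev = r_seq[i - 1]
--         cur = r_seq[i]
--         if prev == " " and cur != " ":
--             # exon starts
--             start_end.append(i)
--             continue
--         elif prev != " " and cur == " ":
--             start_end.append(i)
--             continue
--     return start_end
-- ===== SOURCE B (Python) =====
-- def get_starts_ends(r_seq):
--     """Return start and end indexes."""
--     n = len(r_seq)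
--     start_end = []
--     i = 0
--     while i < n:
--         if r_seq[i] == " ":
--             i += 1
--             continue
--         # run of non-space characters starting here
--         s = i
--         while i < n and r_seq[i] != " ":
--             i += 1
--         if s > 0:
--             start_end.append(s)
--         if i < n:
--             start_end.append(i)
--     return start_end
-- ===== Notes on version B (the rewrite author's own statement) =====
-- stated objective: alternative
-- what changed: B scans maximal runs of non-space characters (skip-spaces outer loop with an inner run-consuming loop) and emits each run's start (if > 0) and end (if < len), instead of A's pairwise comparison of every adjacent character pair.
import Mathlib
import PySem

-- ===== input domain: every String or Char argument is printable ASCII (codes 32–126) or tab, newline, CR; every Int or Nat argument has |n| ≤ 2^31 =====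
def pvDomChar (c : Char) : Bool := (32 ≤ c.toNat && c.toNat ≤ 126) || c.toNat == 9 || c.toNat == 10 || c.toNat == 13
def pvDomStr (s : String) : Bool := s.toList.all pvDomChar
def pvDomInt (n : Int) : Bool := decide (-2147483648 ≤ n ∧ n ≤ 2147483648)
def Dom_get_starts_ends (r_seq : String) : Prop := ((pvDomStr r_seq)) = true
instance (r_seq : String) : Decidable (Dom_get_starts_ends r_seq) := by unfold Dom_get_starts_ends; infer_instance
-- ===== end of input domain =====

-- B replaces A's adjacent-pair comparison with a run-scanning loop over maximal
-- non-space runs, emitting each run's guarded start and end (objective: alternative).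

-- ===== PORT A =====
-- one iteration of A's 'for i in range(1, r_len)' body
def getSE_step (cs : List Char) (acc : List Int) (i : Int) : List Int :=
  let prev := PySem.List.pyGetD cs (i - 1) ' '   -- r_seq[i-1]; 0 ≤ i-1 < len so exact
  let cur := PySem.List.pyGetD cs i ' '          -- r_seq[i]
  if prev = ' ' ∧ cur ≠ ' ' then acc ++ [i]
  else if prev ≠ ' ' ∧ cur = ' ' then acc ++ [i]
  else acc

def get_starts_ends (r_seq : String) : List Int :=
  let cs := r_seq.toList
  let r_len : Int := cs.length
  (PySem.List.pyRange 1 r_len 1).foldl (getSE_step cs) []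

-- ===== PORT B =====
-- inner 'while i < n and r_seq[i] != " "': returns (index after the run, remaining chars)
def bRun : List Char → Int → Int × List Char
  | [], i => (i, [])
  | c :: t, i => if c = ' ' then (i, c :: t) else bRun t (i + 1)

lemma bRun_len_le : ∀ (t : List Char) (i : Int), (bRun t i).2.length ≤ t.length := by
  intro t
  induction t with
  | nil => intro i; simp [bRun]
  | cons c t ih =>
    intro i
    by_cases hc : c = ' ' <;> simp [bRun, hc]
    exact Nat.le_succ_of_le (ih (i + 1))

-- outer 'while i < n' of B
def bLoop (cs : List Char) (i n : Int) : List Int :=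
  match cs with
  | [] => []
  | c :: t =>
    if c = ' ' then bLoop t (i + 1) n
    else
      -- inner while starts at position i on c ≠ ' ', so it equals bRun t (i+1)
      let r := bRun t (i + 1)
      (if 0 < i then [i] else []) ++ (if r.1 < n then [r.1] else []) ++ bLoop r.2 r.1 n
termination_by cs.length
decreasing_by
  · simp
  · simpa using Nat.lt_succ_of_le (bRun_len_le t (i + 1))

def get_starts_ends_alt (r_seq : String) : List Int :=
  let cs := r_seq.toList
  bLoop cs 0 cs.length

-- ===== PRECONDITION & SPEC =====
def Spec_get_starts_ends (r_seq : String) (out : List Int) : Prop := out = get_starts_ends_alt r_seq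
instance (r_seq : String) (out : List Int) : Decidable (Spec_get_starts_ends r_seq out) := by unfold Spec_get_starts_ends; infer_instance

-- ===== CLAIM (what is proved, stated in full; the proofs are below) =====
def Claim_equal_get_starts_ends : Prop := ∀ (r_seq : String), Dom_get_starts_ends r_seq → Spec_get_starts_ends r_seq (get_starts_ends r_seq)

-- ===== LEMMAS AND PROOFS =====

-- common characterization: boundary indices from (previous char, position, rest)
def T : Char → Int → List Char → List Int
  | _, _, [] => []
  | p, i, c :: t => (if (p = ' ') ≠ (c = ' ') then [i] else []) ++ T c (i + 1) t

lemma A_loop : ∀ (t : List Char) (cs : List Char) (k : Nat) (p : Char) (acc : List Int),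
    cs.drop k = p :: t →
    (PySem.List.pyRange ((k : Int) + 1) cs.length 1).foldl (getSE_step cs) acc
      = acc ++ T p ((k : Int) + 1) t := by
  intro t
  induction t with
  | nil =>
    intro cs k p acc h
    have hlen : cs.length = k + 1 := by
      have := congrArg List.length h
      simp [List.length_drop] at this
      omega
    have hnb : ¬ ((k : Int) + 1 < (cs.length : Int)) := by
      rw [hlen]; push_cast; omega
    simp [PySem.List.pyRange, hnb, T]
  | cons c t' ih =>
    intro cs k p acc h
    have hlen : k + 1 < cs.length := by
      have := congrArg List.length h
      simp [List.length_drop] at this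
      omega
    have hk : (k : Int) + 1 < (cs.length : Int) := by exact_mod_cast hlen
    rw [PySem.List.pyRange_one_cons hk, List.foldl_cons]
    have hp : cs[k]? = some p := by
      have h0 : (cs.drop k)[0]? = cs[k + 0]? := List.getElem?_drop
      rw [h] at h0; simpa using h0.symm
    have hc : cs[k + 1]? = some c := by
      have h1 : (cs.drop k)[1]? = cs[k + 1]? := List.getElem?_drop
      rw [h] at h1; simpa using h1.symm
    have hstep : getSE_step cs acc ((k : Int) + 1)
        = acc ++ (if (p = ' ') ≠ (c = ' ') then [(k : Int) + 1] else []) := by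
      have g1 : PySem.List.pyGetD cs ((k : Int) + 1 - 1) ' ' = p := by
        have e1 : ((k : Int) + 1 - 1) = ((k : Nat) : Int) := by ring
        rw [e1, PySem.List.pyGetD_natCast, List.getD_eq_getElem?_getD, hp]
        rfl
      have g2 : PySem.List.pyGetD cs ((k : Int) + 1) ' ' = c := by
        have e2 : ((k : Int) + 1) = (((k + 1 : Nat)) : Int) := by push_cast; ring
        rw [e2, PySem.List.pyGetD_natCast, List.getD_eq_getElem?_getD, hc]
        rfl
      simp only [getSE_step, g1, g2]
      by_cases hps : p = ' ' <;> by_cases hcs : c = ' ' <;> simp [hps, hcs]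
    rw [hstep]
    have hdrop : cs.drop (k + 1) = c :: t' := by
      rw [List.drop_add_one_eq_tail_drop, h]; rfl
    have hih := ih cs (k + 1) c (acc ++ (if (p = ' ') ≠ (c = ' ') then [(k : Int) + 1] else [])) hdrop
    have ecast : (((k + 1 : Nat)) : Int) + 1 = (k : Int) + 1 + 1 := by push_cast; ring
    rw [ecast] at hih
    rw [hih, List.append_assoc]
    congr 1

lemma A_char (r_seq : String) :
    get_starts_ends r_seq =
      (match r_seq.toList with
       | [] => []
       | c :: t => T c 1 t) := by
  unfold get_starts_ends
  cases h : r_seq.toList with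
  | nil => simp [PySem.List.pyRange]
  | cons c t =>
    have h0 : r_seq.toList.drop 0 = c :: t := by simp [h]
    have hA := A_loop t r_seq.toList 0 c [] h0
    rw [h] at hA
    simpa using hA

lemma B_joint : ∀ (m : Nat) (t : List Char), t.length = m →
    (∀ (i n : Int), 1 ≤ i → i + t.length = n → bLoop t i n = T ' ' i t) ∧
    (∀ (p : Char) (i n : Int), 1 ≤ i → p ≠ ' ' → i + t.length = n →
      (if (bRun t i).1 < n then [(bRun t i).1] else []) ++ bLoop (bRun t i).2 (bRun t i).1 n
        = T p i t) := by
  intro m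
  induction m using Nat.strong_induction_on with
  | _ m ih =>
    intro t hm
    constructor
    · intro i n hi hn
      match t, hm with
      | [], hm => simp [bLoop, T]
      | c :: t', hm =>
        have hlt : t'.length < m := by simp at hm; omega
        by_cases hc : c = ' '
        · rw [bLoop, if_pos hc]
          have hM := (ih t'.length hlt t' rfl).1 (i + 1) n (by omega)
            (by simp at hn ⊢; omega)
          rw [hM]
          simp [T, hc]
        · rw [bLoop, if_neg hc, if_pos (show (0 : Int) < i by omega), List.append_assoc]
          have h2 := (ih t'.length hlt t' rfl).2 c (i + 1) n (by omega) hc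
            (by simp at hn ⊢; omega)
          rw [h2]
          simp [T, hc]
    · intro p i n hi hp hn
      match t, hm with
      | [], hm =>
        have hni : ¬ (i < n) := by simp at hn; omega
        simp [bRun, bLoop, T, hni]
      | c :: t', hm =>
        have hlt : t'.length < m := by simp at hm; omega
        by_cases hc : c = ' '
        · have hrun : bRun (c :: t') i = (i, c :: t') := by simp [bRun, hc]
          rw [hrun]
          have hin : i < n := by simp at hn; omega
          rw [if_pos hin, bLoop, if_pos hc]
          have hM := (ih t'.length hlt t' rfl).1 (i + 1) n (by omega)
            (by simp at hn ⊢; omega)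
          rw [hM]
          simp [T, hc, hp]
        · have hrun : bRun (c :: t') i = bRun t' (i + 1) := by simp [bRun, hc]
          rw [hrun]
          have h2 := (ih t'.length hlt t' rfl).2 c (i + 1) n (by omega) hc
            (by simp at hn ⊢; omega)
          rw [h2]
          simp [T, hc, hp]

lemma B_char (r_seq : String) :
    get_starts_ends_alt r_seq =
      (match r_seq.toList with
       | [] => []
       | c :: t => T c 1 t) := by
  unfold get_starts_ends_alt
  cases h : r_seq.toList with
  | nil => simp [bLoop]
  | cons c t =>
    have hn : (1 : Int) + t.length = ((c :: t).length : Int) := by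
      push_cast [List.length_cons]; ring
    by_cases hc : c = ' '
    · rw [bLoop, if_pos hc]
      have hM := (B_joint t.length t rfl).1 1 ((c :: t).length : Int) le_rfl hn
      norm_num at hM ⊢
      rw [hM]
      simp [hc]
    · rw [bLoop, if_neg hc, if_neg (show ¬ (0 : Int) < 0 by omega)]
      have h2 := (B_joint t.length t rfl).2 c 1 ((c :: t).length : Int) le_rfl hc hn
      norm_num at h2 ⊢
      exact h2

-- ===== VERDICT (by name: the statement is the Claim_ definition above) =====
theorem get_starts_ends_spec : Claim_equal_get_starts_ends := by
  intro r_seq _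
  unfold Spec_get_starts_ends
  rw [A_char, B_char]
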